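-- pv_equiv track=rewrite | github.com/sowmyakavali/Customized-Deepsort-Tracking | deep_sort/deep_sort.py | recur_trackid
-- ===== SOURCE A (Python) =====
-- def recur_trackid(track_id, prev_ids, class_id):
--     if track_id in list(prev_ids.keys()) and class_id == prev_ids[track_id]:
--         return track_id
--     elif track_id in list(prev_ids.keys()) and class_id != prev_ids[track_id]:
--         track_id = track_id + 1
--         return recur_trackid(track_id, prev_ids, class_id)
--     else:
--         return track_id
-- ===== SOURCE B (Python) =====
-- def recur_trackid(track_id, prev_ids, class_id):
--     # Precompute the set of ids blocked by a different class, then bump the id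
--     # a bounded number of times: among len(blocked)+1 consecutive ids starting
--     # at track_id, the first unblocked one is reached within len(blocked) bumps.
--     blocked = {k for k, v in prev_ids.items() if v != class_id}
--     t = track_id
--     for _ in range(len(blocked)):
--         if t in blocked:
--             t += 1
--     return t
-- ===== Notes on version B (the rewrite author's own statement) =====
-- stated objective: alternative
-- what changed: Replaces the unbounded tail-recursion (membership test plus dict lookup at every step) by precomputing once the set of ids blocked by a different class and then bumping the id in a bounded for-loop of len(blocked) iterations.
import Mathlib
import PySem

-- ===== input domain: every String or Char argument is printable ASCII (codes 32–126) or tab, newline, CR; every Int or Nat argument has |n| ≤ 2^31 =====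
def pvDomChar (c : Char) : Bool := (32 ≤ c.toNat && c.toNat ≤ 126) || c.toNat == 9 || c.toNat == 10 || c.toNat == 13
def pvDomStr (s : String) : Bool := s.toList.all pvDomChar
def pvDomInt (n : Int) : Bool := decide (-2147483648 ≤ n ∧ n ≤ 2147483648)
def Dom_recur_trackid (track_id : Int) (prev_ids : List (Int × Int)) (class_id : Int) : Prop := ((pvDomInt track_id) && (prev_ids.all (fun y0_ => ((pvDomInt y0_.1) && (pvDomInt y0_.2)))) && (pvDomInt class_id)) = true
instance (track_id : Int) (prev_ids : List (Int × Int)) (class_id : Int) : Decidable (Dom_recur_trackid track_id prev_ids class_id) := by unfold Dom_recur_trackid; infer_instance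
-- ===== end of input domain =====

-- B precomputes the set of ids blocked by a different class once, then bumps the id in a
-- bounded loop of |blocked| steps, instead of A's tail-recursion that re-scans the dict each step.


-- termination helper for port A: bumping past a present key strictly shrinks the
-- number of entries whose key is ≥ the current id (cited by decreasing_by)
theorem pv_filter_decr {α : Type} (f : α → Int) (t : Int) (l : List α)
    (h : ∃ p ∈ l, f p = t) :
    (l.filter (fun p => decide (t + 1 ≤ f p))).length <
      (l.filter (fun p => decide (t ≤ f p))).length := by
  induction l with
  | nil => rcases h with ⟨p, hp, _⟩; cases hp
  | cons a l ih =>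
    simp only [List.filter_cons]
    rcases h with ⟨p, hp, hfp⟩
    have hmono := List.Sublist.length_le
      (List.monotone_filter_right l
        (p := fun p => decide (t + 1 ≤ f p)) (q := fun p => decide (t ≤ f p))
        (fun a ha => by simp_all; omega))
    rcases List.mem_cons.mp hp with rfl | hmem
    · have h1 : decide (t + 1 ≤ f p) = false := by simp [hfp]
      have h2 : decide (t ≤ f p) = true := by simp [hfp]
      rw [h1, h2]
      simp only [if_false, if_true, Bool.false_eq_true, List.length_cons]
      omega
    · have hlt := ih ⟨p, hmem, hfp⟩
      by_cases h1 : (t + 1 : Int) ≤ f a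
      · have h2 : t ≤ f a := by omega
        simp only [h1, h2, decide_true, if_true, List.length_cons]
        omega
      · by_cases h2 : t ≤ f a <;>
          simp only [h1, h2, decide_true, decide_false, if_true, if_false,
            Bool.false_eq_true, List.length_cons] <;> omega

-- ===== PORT A =====
def recur_trackid (track_id : Int) (prev_ids : List (Int × Int)) (class_id : Int) : Int :=
  let d : PySem.Dict Int Int := PySem.Dict.mk prev_ids
  if track_id ∈ d.keys ∧ d.get? track_id = some class_id then
    track_id
  else if track_id ∈ d.keys ∧ ¬ (d.get? track_id = some class_id) then
    recur_trackid (track_id + 1) prev_ids class_id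
  else
    track_id
termination_by (prev_ids.filter (fun p => decide (track_id ≤ p.1))).length
decreasing_by
  rename_i _h1 h2
  apply pv_filter_decr
  have hk : track_id ∈ prev_ids.map Prod.fst := by
    simpa [PySem.Dict.keys] using h2.1
  rcases List.mem_map.mp hk with ⟨p, hp, hfst⟩
  exact ⟨p, hp, hfst⟩

-- ===== PORT B =====
def recur_trackid_alt (track_id : Int) (prev_ids : List (Int × Int)) (class_id : Int) : Int :=
  let blocked : PySem.Set Int :=
    PySem.Set.ofList ((((PySem.Dict.mk prev_ids).items).filter
      (fun p => decide (p.2 ≠ class_id))).map Prod.fst)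
  (PySem.List.pyRange 0 (blocked.length : Int)).foldl
    (fun t _ => if PySem.Set.contains blocked t then t + 1 else t) track_id

-- ===== PRECONDITION & SPEC =====
-- Pre_ excludes association lists with duplicate keys: the list models a Python dict,
-- whose keys are unique, so such lists correspond to no input the Python function can receive.
def Pre_recur_trackid (track_id : Int) (prev_ids : List (Int × Int)) (class_id : Int) : Prop :=
  (prev_ids.map Prod.fst).Nodup
instance (track_id : Int) (prev_ids : List (Int × Int)) (class_id : Int) : Decidable (Pre_recur_trackid track_id prev_ids class_id) := by unfold Pre_recur_trackid; infer_instance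

def pvWitness_recur_trackid : Int × (List (Int × Int)) × Int := (5, [(5, 1), (6, 2)], 1)

def Spec_recur_trackid (track_id : Int) (prev_ids : List (Int × Int)) (class_id : Int) (out : Int) : Prop := out = recur_trackid_alt track_id prev_ids class_id
instance (track_id : Int) (prev_ids : List (Int × Int)) (class_id : Int) (out : Int) : Decidable (Spec_recur_trackid track_id prev_ids class_id out) := by unfold Spec_recur_trackid; infer_instance

-- ===== CLAIM (what is proved, stated in full; the proofs are below) =====
def Claim_equal_recur_trackid : Prop := ∀ (track_id : Int) (prev_ids : List (Int × Int)) (class_id : Int), Dom_recur_trackid track_id prev_ids class_id → Pre_recur_trackid track_id prev_ids class_id → Spec_recur_trackid track_id prev_ids class_id (recur_trackid track_id prev_ids class_id)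

-- ===== LEMMAS AND PROOFS =====

-- the blocked set B's port builds
def pvBlocked (prev_ids : List (Int × Int)) (class_id : Int) : PySem.Set Int :=
  PySem.Set.ofList ((prev_ids.filter (fun p => decide (p.2 ≠ class_id))).map Prod.fst)

-- B's loop body, iterated n times
def pvIter (S : PySem.Set Int) : Nat → Int → Int
  | 0, t => t
  | n + 1, t => pvIter S n (if PySem.Set.contains S t then t + 1 else t)

theorem pv_mem_blocked (prev_ids : List (Int × Int)) (class_id t : Int) :
    t ∈ pvBlocked prev_ids class_id ↔ ∃ v, (t, v) ∈ prev_ids ∧ v ≠ class_id := by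
  unfold pvBlocked
  rw [PySem.Set.mem_ofList]
  constructor
  · intro h
    rcases List.mem_map.mp h with ⟨p, hp, hfst⟩
    rcases List.mem_filter.mp hp with ⟨hmem, hne⟩
    refine ⟨p.2, ?_, of_decide_eq_true hne⟩
    have hmem' : (p.1, p.2) ∈ prev_ids := by simpa using hmem
    rwa [hfst] at hmem'
  · rintro ⟨v, hmem, hne⟩
    exact List.mem_map.mpr ⟨(t, v), List.mem_filter.mpr ⟨hmem, by simpa using hne⟩, rfl⟩

-- A's branch condition "track_id in keys and class_id != prev_ids[track_id]" is membership
-- in the blocked set, given unique keys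
theorem pv_blocked_char (prev_ids : List (Int × Int)) (class_id t : Int)
    (hn : (prev_ids.map Prod.fst).Nodup) :
    (t ∈ (PySem.Dict.mk prev_ids).keys ∧
      ¬ ((PySem.Dict.mk prev_ids).get? t = some class_id)) ↔
      t ∈ pvBlocked prev_ids class_id := by
  rw [pv_mem_blocked]
  have hkn : (PySem.Dict.mk prev_ids).keys.Nodup := by simpa [PySem.Dict.keys_mk] using hn
  constructor
  · rintro ⟨hk, hne⟩
    have hk' : t ∈ prev_ids.map Prod.fst := by simpa [PySem.Dict.keys] using hk
    have hsome : ((PySem.Dict.mk prev_ids).get? t).isSome := by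
      rw [← PySem.Dict.contains_eq_isSome_get?, PySem.Dict.contains_mk]
      rcases List.mem_map.mp hk' with ⟨p, hp, hfst⟩
      exact List.any_eq_true.mpr ⟨p, hp, by simp [hfst]⟩
    rcases Option.isSome_iff_exists.mp hsome with ⟨v, hv⟩
    exact ⟨v, PySem.Dict.mem_items_of_get?_eq_some _ hv, fun h => hne (h ▸ hv)⟩
  · rintro ⟨v, hmem, hne⟩
    have hv : (PySem.Dict.mk prev_ids).get? t = some v :=
      PySem.Dict.get?_of_mem_items _ hmem hkn
    refine ⟨?_, fun h => hne (Option.some.inj (hv ▸ h))⟩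
    show t ∈ ((PySem.Dict.mk prev_ids).items).map Prod.fst
    exact List.mem_map.mpr ⟨(t, v), hmem, rfl⟩

-- when the current id is not blocked, A returns it at once
theorem pv_A_fix (prev_ids : List (Int × Int)) (class_id t : Int)
    (hn : (prev_ids.map Prod.fst).Nodup) (h : t ∉ pvBlocked prev_ids class_id) :
    recur_trackid t prev_ids class_id = t := by
  rw [recur_trackid]
  split_ifs with h1 h2
  · rfl
  · exact absurd ((pv_blocked_char prev_ids class_id t hn).mp h2) h
  · rfl

theorem pv_iter_fix (S : PySem.Set Int) (t : Int) (h : t ∉ S) :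
    ∀ n, pvIter S n t = t := by
  intro n
  induction n with
  | zero => rfl
  | succ n ih => simp [pvIter, h, ih]

theorem pv_main (prev_ids : List (Int × Int)) (class_id : Int)
    (hn : (prev_ids.map Prod.fst).Nodup) :
    ∀ (n : Nat) (t : Int),
      ((pvBlocked prev_ids class_id).filter (fun k => decide (t ≤ k))).length ≤ n →
      pvIter (pvBlocked prev_ids class_id) n t = recur_trackid t prev_ids class_id := by
  intro n
  induction n with
  | zero =>
    intro t hlen
    have hnot : t ∉ pvBlocked prev_ids class_id := by
      intro hmem
      have : t ∈ (pvBlocked prev_ids class_id).filter (fun k => decide (t ≤ k)) :=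
        List.mem_filter.mpr ⟨hmem, by simp⟩
      have := List.length_pos_of_mem this
      omega
    rw [pv_A_fix prev_ids class_id t hn hnot]
    rfl
  | succ n ih =>
    intro t hlen
    by_cases hb : t ∈ pvBlocked prev_ids class_id
    · have hc : PySem.Set.contains (pvBlocked prev_ids class_id) t = true := by
        rw [PySem.Set.contains_eq_decide]; exact decide_eq_true hb
      have hdecr : ((pvBlocked prev_ids class_id).filter
            (fun k => decide (t + 1 ≤ k))).length <
          ((pvBlocked prev_ids class_id).filter (fun k => decide (t ≤ k))).length :=
        pv_filter_decr (fun k => k) t (pvBlocked prev_ids class_id) ⟨t, hb, rfl⟩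
      have hih := ih (t + 1) (by omega)
      have hAB := (pv_blocked_char prev_ids class_id t hn).mpr hb
      rw [recur_trackid]
      rw [if_neg (fun h1 => hAB.2 h1.2), if_pos hAB]
      show pvIter (pvBlocked prev_ids class_id) n
          (if PySem.Set.contains (pvBlocked prev_ids class_id) t then t + 1 else t) = _
      rw [hc, if_pos rfl]
      exact hih
    · rw [pv_A_fix prev_ids class_id t hn hb]
      exact pv_iter_fix _ t hb (n + 1)

-- B's port as the iterated loop body
theorem pv_alt_eq_iter (track_id : Int) (prev_ids : List (Int × Int)) (class_id : Int) :
    recur_trackid_alt track_id prev_ids class_id =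
      pvIter (pvBlocked prev_ids class_id) (pvBlocked prev_ids class_id).length track_id := by
  have hgen : ∀ (S : PySem.Set Int) (l : List Int) (t : Int),
      l.foldl (fun t _ => if PySem.Set.contains S t then t + 1 else t) t =
        pvIter S l.length t := by
    intro S l
    induction l with
    | nil => intro t; rfl
    | cons a l ih => intro t; simp only [List.foldl_cons, List.length_cons, pvIter]; exact ih _
  show (PySem.List.pyRange 0 ((pvBlocked prev_ids class_id).length : Int)).foldl
      (fun t _ => if PySem.Set.contains (pvBlocked prev_ids class_id) t then t + 1 else t)
      track_id = _
  rw [PySem.List.pyRange_zero_natCast, hgen]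
  simp

-- ===== VERDICT (by name: the statement is the Claim_ definition above) =====
theorem recur_trackid_spec : Claim_equal_recur_trackid := by
  intro track_id prev_ids class_id _hdom hpre
  unfold Spec_recur_trackid
  rw [pv_alt_eq_iter]
  exact (pv_main prev_ids class_id hpre (pvBlocked prev_ids class_id).length track_id
    (List.Sublist.length_le List.filter_sublist)).symm
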